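-- pv_equiv track=rewrite | github.com/8thMay03/PYTHON_PTIT | PY01069.ChuSoNguyenTo.py | check
-- ===== SOURCE A (Python) =====
-- def check(s):
--     cnt2, cnt3, cnt5, cnt7 = 0, 0, 0, 0
--     for c in s:
--         if c != '2' and c != '3' and c != '5' and c != '7':
--             return False
--         if c == '2':
--             cnt2 += 1
--         if c == '3':
--             cnt3 += 1
--         if c == '5':
--             cnt5 += 1
--         if c == '7':
--             cnt7 += 1
--     if cnt2 * cnt3 * cnt5 * cnt7 == 0:
--         return False
--
--     if int(s[-1]) % 2 == 0:
--         return False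
--     return True
-- ===== SOURCE B (Python) =====
-- def check(s):
--     keys = []
--     for c in sorted(s):
--         if not keys or keys[-1] != c:
--             keys.append(c)
--     return keys == ['2', '3', '5', '7'] and s[-1] != '2'
-- ===== Notes on version B (the rewrite author's own statement) =====
-- stated objective: alternative
-- what changed: Replaces A's single pass with four running counters and an early-return validity test by a sort-then-scan algorithm: sort the characters, collapse adjacent duplicates into the sorted list of distinct characters, compare that list for equality with ['2','3','5','7'] (which enforces both 'only prime digits' and 'all four present' at once), then test the last character for oddness.
import Mathlib
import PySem

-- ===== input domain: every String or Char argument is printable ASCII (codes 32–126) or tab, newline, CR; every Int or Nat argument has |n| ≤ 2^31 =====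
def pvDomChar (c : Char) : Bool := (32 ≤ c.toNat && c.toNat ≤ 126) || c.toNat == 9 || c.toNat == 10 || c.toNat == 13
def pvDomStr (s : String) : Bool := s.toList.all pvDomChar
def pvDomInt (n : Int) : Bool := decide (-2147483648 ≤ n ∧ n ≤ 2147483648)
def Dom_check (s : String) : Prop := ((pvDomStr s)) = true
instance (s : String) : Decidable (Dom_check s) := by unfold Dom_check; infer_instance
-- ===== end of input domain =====

-- B replaces A's single counting pass by sort + adjacent-dedup + list-equality test (objective: alternative).

-- ===== PORT A =====
-- the for-loop of A: early `return False` becomes `none`, a completed loop returns the four counters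
def checkLoop : List Char → Int → Int → Int → Int → Option (Int × Int × Int × Int)
  | [], c2, c3, c5, c7 => some (c2, c3, c5, c7)
  | c :: rest, c2, c3, c5, c7 =>
    if c ≠ '2' ∧ c ≠ '3' ∧ c ≠ '5' ∧ c ≠ '7' then none
    else checkLoop rest (if c = '2' then c2 + 1 else c2) (if c = '3' then c3 + 1 else c3)
           (if c = '5' then c5 + 1 else c5) (if c = '7' then c7 + 1 else c7)

def check (s : String) : Bool :=
  match checkLoop s.toList 0 0 0 0 with
  | none => false
  | some (c2, c3, c5, c7) =>
    if c2 * c3 * c5 * c7 = 0 then false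
    else
      match PySem.Str.pyGet? s (-1) with
      | none => false      -- unreachable: nonzero counters force s nonempty
      | some c =>
        match PySem.Int.ofChars? [c] with  -- int(s[-1])
        | none => false    -- unreachable: c is a digit here
        | some n => if PySem.Int.mod n 2 = 0 then false else true

-- ===== PORT B =====
-- the for-loop of B: collapse adjacent duplicates of the sorted character list
def dedupGo : List Char → List Char → List Char
  | [], keys => keys
  | c :: rest, keys =>
    if keys = [] ∨ keys.getLast? ≠ some c then dedupGo rest (keys ++ [c])
    else dedupGo rest keys

def check_alt (s : String) : Bool :=
  let keys := dedupGo (PySem.List.sorted s.toList (fun x => x) false) []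
  keys = ['2', '3', '5', '7'] &&
    (match PySem.Str.pyGet? s (-1) with   -- s[-1]; not reached in Python when the first conjunct fails
     | none => false
     | some c => c ≠ '2')

-- ===== PRECONDITION & SPEC =====
def Spec_check (s : String) (out : Bool) : Prop := out = check_alt s
instance (s : String) (out : Bool) : Decidable (Spec_check s out) := by unfold Spec_check; infer_instance

-- ===== CLAIM (what is proved, stated in full; the proofs are below) =====
def Claim_equal_check : Prop := ∀ (s : String), Dom_check s → Spec_check s (check s)

-- ===== LEMMAS AND PROOFS =====

lemma checkLoop_spec (l : List Char) (c2 c3 c5 c7 : Int) :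
    checkLoop l c2 c3 c5 c7 =
      if l.all (fun c => c = '2' ∨ c = '3' ∨ c = '5' ∨ c = '7') then
        some (c2 + l.count '2', c3 + l.count '3', c5 + l.count '5', c7 + l.count '7')
      else none := by
  induction l generalizing c2 c3 c5 c7 with
  | nil => simp [checkLoop]
  | cons c rest ih =>
    by_cases h : c ≠ '2' ∧ c ≠ '3' ∧ c ≠ '5' ∧ c ≠ '7'
    · have hc : ¬ (c = '2' ∨ c = '3' ∨ c = '5' ∨ c = '7') := by tauto
      simp [checkLoop, h]
    · have hc : c = '2' ∨ c = '3' ∨ c = '5' ∨ c = '7' := by tauto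
      rw [checkLoop, if_neg h, ih]
      rcases hc with rfl | rfl | rfl | rfl <;> simp <;>
        split_ifs <;> simp <;> omega

lemma mem_dedupGo (l keys : List Char) (x : Char) :
    x ∈ dedupGo l keys ↔ x ∈ keys ∨ x ∈ l := by
  induction l generalizing keys with
  | nil => simp [dedupGo]
  | cons c rest ih =>
    by_cases h : keys = [] ∨ keys.getLast? ≠ some c
    · rw [dedupGo, if_pos h, ih]
      simp only [List.mem_append, List.mem_singleton, List.mem_cons]
      tauto
    · push_neg at h
      have hc : c ∈ keys := List.mem_of_getLast? h.2
      rw [dedupGo, if_neg (by push_neg; exact h), ih]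
      simp only [List.mem_cons]
      constructor
      · tauto
      · rintro (hx | rfl | hx) <;> tauto

lemma le_getLast?_of_pairwise_lt (l : List Char) (h : l.Pairwise (· < ·))
    (y z : Char) (hy : y ∈ l) (hz : l.getLast? = some z) : y ≤ z := by
  induction l with
  | nil => simp at hy
  | cons a t ih =>
    rcases List.pairwise_cons.1 h with ⟨ha, ht⟩
    cases t with
    | nil =>
      simp at hy hz; simp [hy, hz]
    | cons b t' =>
      rw [List.getLast?_cons_cons] at hz
      rcases List.mem_cons.1 hy with rfl | hy'
      · have hb : z ∈ b :: t' := List.mem_of_getLast? hz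
        exact le_of_lt (ha z hb)
      · exact ih ht hy' hz

lemma pairwise_dedupGo (l keys : List Char)
    (hk : keys.Pairwise (· < ·)) (hl : l.Pairwise (· ≤ ·))
    (hsep : ∀ y ∈ keys, ∀ x ∈ l, y ≤ x) :
    (dedupGo l keys).Pairwise (· < ·) := by
  induction l generalizing keys with
  | nil => simpa [dedupGo] using hk
  | cons c rest ih =>
    rcases List.pairwise_cons.1 hl with ⟨hcrest, hrest⟩
    by_cases h : keys = [] ∨ keys.getLast? ≠ some c
    · rw [dedupGo, if_pos h]
      apply ih (keys ++ [c])
      · rw [List.pairwise_append]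
        refine ⟨hk, by simp, ?_⟩
        intro y hy z hz
        rw [List.mem_singleton] at hz; rw [hz]; clear hz
        rcases h with h0 | hne
        · subst h0; simp at hy
        · have hkne : keys ≠ [] := List.ne_nil_of_mem hy
          obtain ⟨z', hz'⟩ : ∃ z', keys.getLast? = some z' := by
            cases hk' : keys.getLast? with
            | none => exact absurd (List.getLast?_eq_none_iff.1 hk') hkne
            | some z' => exact ⟨z', rfl⟩
          have hyz : y ≤ z' := le_getLast?_of_pairwise_lt keys hk y z' hy hz'
          have hz'c : z' ≤ c := hsep z' (List.mem_of_getLast? hz') c (by simp)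
          have hz'ne : z' ≠ c := fun he => hne (he ▸ hz')
          exact lt_of_le_of_lt hyz (lt_of_le_of_ne hz'c hz'ne)
      · exact hrest
      · intro y hy x hx
        rcases List.mem_append.1 hy with hy' | hy'
        · exact hsep y hy' x (List.mem_cons_of_mem _ hx)
        · rw [List.mem_singleton] at hy'; subst hy'
          exact hcrest x hx
    · rw [dedupGo, if_neg (by push_neg at h ⊢; exact h)]
      exact ih keys hk hrest (fun y hy x hx => hsep y hy x (List.mem_cons_of_mem _ hx))

lemma dedup_sorted_eq_iff (l : List Char) :
    dedupGo (PySem.List.sorted l (fun x => x) false) [] = ['2', '3', '5', '7'] ↔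
      ((∀ c ∈ l, c = '2' ∨ c = '3' ∨ c = '5' ∨ c = '7') ∧
        '2' ∈ l ∧ '3' ∈ l ∧ '5' ∈ l ∧ '7' ∈ l) := by
  have hmemD : ∀ x : Char, x ∈ dedupGo (PySem.List.sorted l (fun x => x) false) [] ↔ x ∈ l := by
    intro x
    rw [mem_dedupGo]
    simp [PySem.List.mem_sorted]
  constructor
  · intro h
    constructor
    · intro c hc
      have : c ∈ dedupGo (PySem.List.sorted l (fun x => x) false) [] := (hmemD c).2 hc
      rw [h] at this
      simpa using this
    · refine ⟨?_, ?_, ?_, ?_⟩ <;> [skip; skip; skip; skip] <;>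
        { apply (hmemD _).1; rw [h]; decide }
  · rintro ⟨hall, h2, h3, h5, h7⟩
    have hpw : (dedupGo (PySem.List.sorted l (fun x => x) false) []).Pairwise (· < ·) := by
      apply pairwise_dedupGo
      · exact List.Pairwise.nil
      · simpa using PySem.List.sorted_pairwise l (fun x => x)
      · intro y hy; simp at hy
    have hnd : (dedupGo (PySem.List.sorted l (fun x => x) false) []).Nodup :=
      hpw.imp (fun h => ne_of_lt h)
    have hiff : ∀ a : Char, a ∈ (['2', '3', '5', '7'] : List Char) ↔
        a ∈ dedupGo (PySem.List.sorted l (fun x => x) false) [] := by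
      intro a
      rw [hmemD a]
      constructor
      · intro ha
        rcases (by simpa using ha : a = '2' ∨ a = '3' ∨ a = '5' ∨ a = '7') with
          rfl | rfl | rfl | rfl <;> assumption
      · intro ha
        rcases hall a ha with rfl | rfl | rfl | rfl <;> decide
    have hperm : (['2', '3', '5', '7'] : List Char).Perm
        (dedupGo (PySem.List.sorted l (fun x => x) false) []) :=
      (List.perm_ext_iff_of_nodup (by decide) hnd).2 hiff
    have h1 : PySem.List.sorted (dedupGo (PySem.List.sorted l (fun x => x) false) [])
        (fun x => x) false = ['2', '3', '5', '7'] :=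
      by
        apply PySem.List.sorted_eq_of_perm_of_pairwise_lt
        · exact hperm
        · decide
    have h2' : PySem.List.sorted (dedupGo (PySem.List.sorted l (fun x => x) false) [])
        (fun x => x) false = dedupGo (PySem.List.sorted l (fun x => x) false) [] :=
      by apply PySem.List.sorted_eq_self_of_pairwise; exact hpw.imp (fun h => le_of_lt h)
    rw [← h2', h1]

theorem check_eq (s : String) : check s = check_alt s := by
  unfold check check_alt
  rw [checkLoop_spec]
  by_cases hall : ∀ c ∈ s.toList, c = '2' ∨ c = '3' ∨ c = '5' ∨ c = '7'
  · rw [if_pos (by simpa using hall)]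
    by_cases hmem : '2' ∈ s.toList ∧ '3' ∈ s.toList ∧ '5' ∈ s.toList ∧ '7' ∈ s.toList
    · have hprod : ¬ ((0 : Int) + s.toList.count '2') * (0 + s.toList.count '3') *
          (0 + s.toList.count '5') * (0 + s.toList.count '7') = 0 := by
        obtain ⟨h2, h3, h5, h7⟩ := hmem
        rw [← List.count_pos_iff] at h2 h3 h5 h7
        positivity
      have hEq : dedupGo (PySem.List.sorted s.toList (fun x => x) false) [] =
          ['2', '3', '5', '7'] := (dedup_sorted_eq_iff s.toList).2 ⟨hall, hmem⟩
      have hne : s.toList ≠ [] := by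
        intro h; rw [h] at hmem; simp at hmem
      have hget : PySem.Str.pyGet? s (-1) = some (s.toList.getLast hne) := by
        simp [PySem.List.pyGet?_neg_one, List.getLast?_eq_getLast_of_ne_nil hne]
      have hlast := hall _ (List.getLast_mem hne)
      simp only [hprod, if_false, hEq, hget]
      rcases hlast with h | h | h | h <;> rw [h] <;> decide
    · have hEq : dedupGo (PySem.List.sorted s.toList (fun x => x) false) [] ≠
          ['2', '3', '5', '7'] :=
        fun hE => hmem ((dedup_sorted_eq_iff s.toList).1 hE).2
      have hzero : ((0 : Int) + s.toList.count '2') * (0 + s.toList.count '3') *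
          (0 + s.toList.count '5') * (0 + s.toList.count '7') = 0 := by
        have : '2' ∉ s.toList ∨ '3' ∉ s.toList ∨ '5' ∉ s.toList ∨ '7' ∉ s.toList := by
          tauto
        rcases this with h | h | h | h <;>
          rw [List.count_eq_zero.2 h] <;> push_cast <;> ring
      simp only [hzero, if_true]
      simp [hEq]
  · have hEq : dedupGo (PySem.List.sorted s.toList (fun x => x) false) [] ≠
        ['2', '3', '5', '7'] :=
      fun hE => hall ((dedup_sorted_eq_iff s.toList).1 hE).1
    rw [if_neg (by simpa using hall)]
    simp [hEq]

-- ===== VERDICT (by name: the statement is the Claim_ definition above) =====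
theorem check_spec : Claim_equal_check := by
  intro s _
  exact check_eq s
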